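-- pv_equiv track=rewrite | github.com/Zentra94/ai-cinema-engine | packages/video_manager/core/screenwriter.py | _paragraphs_splitter
-- ===== SOURCE A (Python) =====
-- def _paragraphs_splitter(text, rules_kw=None, min_length=5):
--     """ Splits a given text into paragraphs based on the specified rules and minimum
--     paragraph length.
--
--     Args:
--         text (str): The text to be split into paragraphs.
--         rules_kw (list[str], optional): A list of keywords that indicate the end of a
--             paragraph (default=["\\n", ",", ".", ";"]).
--         min_length (int, optional): The minimum number of words in a paragraph
--             (default=5).
--
--     Returns:
--         dict: A dictionary where the keys are "p1", "p2", ..., and the values are the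
--             corresponding paragraphs of the input text.
--     """
--
--     if rules_kw is None:
--         rules_kw = ["\n", ",", ".", ";"]
--     paragraphs_dict = {}
--     text_split = text.split()
--
--     n_paragraphs = 0
--     counter = 0
--     new_paragraph = []
--     for i, word in enumerate(text_split):
--         new_paragraph.append(word)
--         counter += 1
--         if counter > min_length:
--             for kw in rules_kw:
--                 if kw in word:
--                     counter = 0
--                     n_paragraphs += 1
--                     paragraphs_dict["p{}".format(n_paragraphs)] = " ".join(
--                         new_paragraph)
--                     new_paragraph = []
--
--                     break
--         if i + 1 == len(text_split) and len(new_paragraph) > 0: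
--             n_paragraphs += 1
--             paragraphs_dict["p{}".format(n_paragraphs)] = " ".join(new_paragraph)
--
--     return paragraphs_dict
-- ===== SOURCE B (Python) =====
-- def _paragraphs_splitter(text, rules_kw=None, min_length=5):
--     if rules_kw is None:
--         rules_kw = ["\n", ",", ".", ";"]
--
--     def first_cut(words):
--         # index of the first word that may end a paragraph: position >= min_length
--         # within the paragraph and containing a delimiter keyword
--         for i, w in enumerate(words):
--             if i >= min_length and any(kw in w for kw in rules_kw):
--                 return i
--         return None
--
--     # repeatedly slice off the first paragraph instead of streaming a counter/buffer
--     paragraphs = []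
--     words = text.split()
--     while words:
--         i = first_cut(words)
--         if i is None:
--             paragraphs.append(" ".join(words))
--             words = []
--         else:
--             paragraphs.append(" ".join(words[:i + 1]))
--             words = words[i + 1:]
--     return {"p{}".format(i + 1): p for i, p in enumerate(paragraphs)}
-- ===== Notes on version B (the rewrite author's own statement) =====
-- stated objective: alternative
-- what changed: Replaces A's single streaming loop (word counter, growing buffer, dict and paragraph number mutated together, last-iteration flush by index) with a slice-based algorithm: repeatedly search the remaining words for the first eligible delimiter position (index >= min_length with a keyword), slice that paragraph off, and finally label the paragraph list with a dict comprehension.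
import Mathlib
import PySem

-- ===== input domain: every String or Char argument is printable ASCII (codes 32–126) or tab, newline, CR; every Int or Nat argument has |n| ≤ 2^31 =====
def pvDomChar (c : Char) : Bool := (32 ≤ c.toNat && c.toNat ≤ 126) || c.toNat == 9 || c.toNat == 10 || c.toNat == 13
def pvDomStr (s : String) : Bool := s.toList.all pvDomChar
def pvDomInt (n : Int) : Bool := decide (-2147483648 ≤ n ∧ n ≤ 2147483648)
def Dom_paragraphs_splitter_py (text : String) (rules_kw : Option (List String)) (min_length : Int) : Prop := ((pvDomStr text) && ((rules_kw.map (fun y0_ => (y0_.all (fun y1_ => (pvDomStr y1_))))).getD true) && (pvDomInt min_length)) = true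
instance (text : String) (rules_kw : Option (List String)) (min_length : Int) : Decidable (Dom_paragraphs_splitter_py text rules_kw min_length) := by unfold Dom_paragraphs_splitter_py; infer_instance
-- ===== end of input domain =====

-- B replaces A's single streaming loop (counter, buffer, dict and paragraph number mutated together)
-- by repeatedly finding the first eligible delimiter position and slicing that paragraph off, then
-- labelling the paragraph list; same results, objective: alternative slice-based decomposition.

-- ===== PORT A =====
-- the 'for i, word in enumerate(text_split)' loop of A, state = (paragraphs_dict, n_paragraphs, counter, new_paragraph)
def pvAloop (len : Nat) (rules : List String) (min_length : Int) :
    Nat → List String → PySem.Dict String String × Int × Int × List String → PySem.Dict String String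
  | _, [], (d, _, _, _) => d
  | i, w :: rest, (d, n, c, buf) =>
      let buf1 := buf ++ [w]
      let c1 := c + 1
      -- 'if counter > min_length: for kw in rules_kw: if kw in word: … break' (body independent of kw, so = any)
      match (if c1 > min_length ∧ rules.any (fun kw => PySem.Str.isIn kw w) = true then
          (PySem.Dict.insert d ("p" ++ PySem.Int.toStr (n + 1)) (PySem.Str.join " " buf1), n + 1, (0 : Int), ([] : List String))
        else (d, n, c1, buf1) : PySem.Dict String String × Int × Int × List String) with
      | (d2, n2, c2, buf2) =>
        -- 'if i + 1 == len(text_split) and len(new_paragraph) > 0: …'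
        if i + 1 = len ∧ buf2 ≠ [] then
          pvAloop len rules min_length (i + 1) rest
            (PySem.Dict.insert d2 ("p" ++ PySem.Int.toStr (n2 + 1)) (PySem.Str.join " " buf2), n2 + 1, c2, buf2)
        else
          pvAloop len rules min_length (i + 1) rest (d2, n2, c2, buf2)

def paragraphs_splitter_py (text : String) (rules_kw : Option (List String)) (min_length : Int) : List (String × String) :=
  let rules := rules_kw.getD ["\n", ",", ".", ";"]
  let text_split := PySem.Str.split₀ text
  (pvAloop text_split.length rules min_length 0 text_split (PySem.Dict.empty, 0, 0, [])).items

-- ===== PORT B =====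
-- first_cut: 'for i, w in enumerate(words): if i >= min_length and any(kw in w …): return i', index
-- kept relative to the call (the loop body advances i and shifts the returned index back by one)
def pvFindCut (rules : List String) (min_length : Int) : Int → List String → Option Nat
  | _, [] => none
  | i, w :: rest =>
      if i ≥ min_length ∧ (rules.any fun kw => PySem.Str.isIn kw w) = true then some 0
      else (pvFindCut rules min_length (i + 1) rest).map (· + 1)

-- the 'while words:' loop: slice off the first paragraph, continue on the rest
def pvSplitRec (rules : List String) (min_length : Int) : List String → List String
  | [] => []
  | w :: ws =>
      match pvFindCut rules min_length 0 (w :: ws) with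
      | none => [PySem.Str.join " " (w :: ws)]
      | some r =>
          PySem.Str.join " " (PySem.List.slice (w :: ws) none (some ((r + 1 : Nat) : Int))) ::
            pvSplitRec rules min_length (PySem.List.slice (w :: ws) (some ((r + 1 : Nat) : Int)) none)
  termination_by ws => ws.length
  decreasing_by
    have := PySem.List.slice_from_natCast (w :: ws) (r + 1)
    rw [this]; simp

def paragraphs_splitter_py_alt (text : String) (rules_kw : Option (List String)) (min_length : Int) : List (String × String) :=
  let rules := rules_kw.getD ["\n", ",", ".", ";"]
  let paragraphs := pvSplitRec rules min_length (PySem.Str.split₀ text)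
  (PySem.List.enumerate paragraphs).map (fun p => ("p" ++ PySem.Int.toStr (p.1 + 1), p.2))

-- ===== PRECONDITION & SPEC =====
def Spec_paragraphs_splitter_py (text : String) (rules_kw : Option (List String)) (min_length : Int) (out : List (String × String)) : Prop := out = paragraphs_splitter_py_alt text rules_kw min_length
instance (text : String) (rules_kw : Option (List String)) (min_length : Int) (out : List (String × String)) : Decidable (Spec_paragraphs_splitter_py text rules_kw min_length out) := by unfold Spec_paragraphs_splitter_py; infer_instance

-- ===== CLAIM (what is proved, stated in full; the proofs are below) =====
def Claim_equal_paragraphs_splitter_py : Prop := ∀ (text : String) (rules_kw : Option (List String)) (min_length : Int), Dom_paragraphs_splitter_py text rules_kw min_length → Spec_paragraphs_splitter_py text rules_kw min_length (paragraphs_splitter_py text rules_kw min_length)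

-- ===== LEMMAS AND PROOFS =====

-- the key "pN" and the labelled paragraph list that both programs produce
def pvKey (n : Int) : String := "p" ++ PySem.Int.toStr n
def pvLabel (paras : List String) : List (String × String) :=
  (PySem.List.enumerate paras).map (fun p => (pvKey (p.1 + 1), p.2))

-- intermediate streaming formulation used only by the proof: groups (word, flag) pairs with a
-- counter exactly as A's loop does, but into a plain list of paragraph strings
def pvFlag (rules : List String) (w : String) : Bool := rules.any (fun kw => PySem.Str.isIn kw w)
def pvGroup (min_length : Int) : List (String × Bool) → List String → List String → Int → List String
  | [], paras, buf, _ => if buf.isEmpty then paras else paras ++ [PySem.Str.join " " buf]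
  | (w, f) :: rest, paras, buf, c =>
      let buf1 := buf ++ [w]
      let c1 := c + 1
      if c1 > min_length ∧ f = true then pvGroup min_length rest (paras ++ [PySem.Str.join " " buf1]) [] 0
      else pvGroup min_length rest paras buf1 c1

-- --- injectivity of the decimal rendering (needed: the keys "p1" … "pn" are pairwise distinct) ---
def pvDigVal (c : Char) : Nat := c.toNat - 48
def pvEval (l : List Char) : Nat := l.foldl (fun a c => a * 10 + pvDigVal c) 0

lemma pvShift (fuel : Nat) : ∀ (n : Nat) (ds : List Char),
    Nat.toDigitsCore 10 fuel n ds = Nat.toDigitsCore 10 fuel n [] ++ ds := by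
  induction fuel with
  | zero => intro n ds; simp [Nat.toDigitsCore]
  | succ f ih =>
    intro n ds
    simp only [Nat.toDigitsCore]
    by_cases h : n / 10 = 0
    · simp [h]
    · simp only [h, ite_false]
      rw [ih (n / 10) (_ :: ds), ih (n / 10) [_]]
      simp

lemma pvStable : ∀ (f g n : Nat), 1 ≤ f → 1 ≤ g → n < 10 ^ f → n < 10 ^ g →
    Nat.toDigitsCore 10 f n [] = Nat.toDigitsCore 10 g n [] := by
  intro f
  induction f with
  | zero => intro g n hf; omega
  | succ f ih =>
    intro g n _ hg hnf hng
    obtain ⟨g', rfl⟩ : ∃ g', g = g' + 1 := ⟨g - 1, by omega⟩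
    simp only [Nat.toDigitsCore]
    by_cases h : n / 10 = 0
    · simp [h]
    · have h10 : 10 ≤ n := by
        by_contra hlt
        exact h (Nat.div_eq_of_lt (by omega))
      have hf' : 1 ≤ f := by
        by_contra hf0
        have : f = 0 := by omega
        subst this
        simp at hnf
        omega
      have hg' : 1 ≤ g' := by
        by_contra hg0
        have : g' = 0 := by omega
        subst this
        simp at hng
        omega
      have hdf : n / 10 < 10 ^ f := by
        rw [Nat.div_lt_iff_lt_mul (by norm_num)]
        calc n < 10 ^ (f + 1) := hnf
        _ = 10 ^ f * 10 := by ring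
      have hdg : n / 10 < 10 ^ g' := by
        rw [Nat.div_lt_iff_lt_mul (by norm_num)]
        calc n < 10 ^ (g' + 1) := hng
        _ = 10 ^ g' * 10 := by ring
      simp only [h, ite_false]
      rw [pvShift f, pvShift g', ih g' (n / 10) hf' hg' hdf hdg]

lemma pvToDigits_lt (n : Nat) (h : n < 10) : Nat.toDigits 10 n = [Nat.digitChar n] := by
  simp [Nat.toDigits, Nat.toDigitsCore, Nat.div_eq_of_lt h, Nat.mod_eq_of_lt h]

lemma pvToDigits_ge (n : Nat) (h : 10 ≤ n) :
    Nat.toDigits 10 n = Nat.toDigits 10 (n / 10) ++ [Nat.digitChar (n % 10)] := by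
  have hne : n / 10 ≠ 0 := by
    have : 1 ≤ n / 10 := (Nat.one_le_div_iff (by norm_num)).2 h
    omega
  have hlt : n < 10 ^ n := Nat.lt_pow_self (by norm_num)
  have hd1 : n / 10 < 10 ^ n := lt_of_le_of_lt (Nat.div_le_self n 10) hlt
  have hd2 : n / 10 < 10 ^ (n / 10 + 1) :=
    lt_of_lt_of_le (Nat.lt_pow_self (by norm_num)) (Nat.pow_le_pow_right (by norm_num) (by omega))
  show Nat.toDigitsCore 10 (n + 1) n [] = _
  simp only [Nat.toDigitsCore]
  rw [if_neg hne, pvShift]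
  rw [pvStable n (n / 10 + 1) (n / 10) (by omega) (by omega) hd1 hd2]
  rfl

lemma pvDigVal_digitChar (d : Nat) (h : d < 10) : pvDigVal (Nat.digitChar d) = d := by
  interval_cases d <;> decide

lemma pvEval_append (l : List Char) (c : Char) : pvEval (l ++ [c]) = pvEval l * 10 + pvDigVal c := by
  simp [pvEval, List.foldl_append]

lemma pvEval_toDigits (n : Nat) : pvEval (Nat.toDigits 10 n) = n := by
  induction n using Nat.strong_induction_on with
  | _ n ih =>
    by_cases h : n < 10
    · rw [pvToDigits_lt n h]
      simpa [pvEval] using pvDigVal_digitChar n h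
    · rw [pvToDigits_ge n (le_of_not_gt h), pvEval_append,
        ih (n / 10) (Nat.div_lt_self (by omega) (by norm_num)),
        pvDigVal_digitChar _ (Nat.mod_lt n (by norm_num))]
      omega

lemma pvToDigits_inj {m n : Nat} (h : Nat.toDigits 10 m = Nat.toDigits 10 n) : m = n := by
  have := congrArg pvEval h
  rwa [pvEval_toDigits, pvEval_toDigits] at this

lemma pvKey_inj {a b : Int} (ha : 0 < a) (hb : 0 < b) (h : pvKey a = pvKey b) : a = b := by
  have h2 := congrArg String.toList h
  simp only [pvKey, String.toList_append, PySem.Int.toList_toStr] at h2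
  simp only [PySem.Int.toChars, if_neg (by omega : ¬ a < 0), if_neg (by omega : ¬ b < 0)] at h2
  have h3 : Nat.toDigits 10 a.toNat = Nat.toDigits 10 b.toNat := by
    simpa using h2
  have := pvToDigits_inj h3
  omega

lemma pvLabel_append (paras : List String) (p : String) :
    pvLabel (paras ++ [p]) = pvLabel paras ++ [(pvKey ((paras.length : Int) + 1), p)] := by
  simp [pvLabel, PySem.List.enumerate_append, PySem.List.enumerate_cons]

lemma pvKey_not_mem (paras : List String) :
    pvKey ((paras.length : Int) + 1) ∉ (pvLabel paras).map Prod.fst := by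
  intro hmem
  simp only [pvLabel, List.map_map, List.mem_map] at hmem
  obtain ⟨q, hq, hkey⟩ := hmem
  rw [PySem.List.mem_enumerate_iff] at hq
  obtain ⟨k, hk, rfl⟩ := hq
  simp only [Function.comp] at hkey
  have := pvKey_inj (by omega) (by omega) hkey.symm
  omega

lemma pvContains_false (d : PySem.Dict String String) (paras : List String)
    (hd : d.items = pvLabel paras) :
    d.contains (pvKey ((paras.length : Int) + 1)) = false := by
  cases hc : d.contains (pvKey ((paras.length : Int) + 1)) with
  | false => rfl
  | true =>
    exfalso
    have := (PySem.Dict.contains_iff_mem_keys d _).1 hc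
    rw [PySem.Dict.keys, hd] at this
    exact pvKey_not_mem paras this

-- A's loop produces exactly the labelled pvGroup paragraphs, by induction on the remaining words
-- (nonempty: the final iteration of A's loop flushes the buffer, pvGroup does it after the loop)
lemma pvLoop_eq (rules : List String) (min_length : Int) :
    ∀ (ws : List String), ws ≠ [] → ∀ (len i : Nat) (d : PySem.Dict String String)
      (paras buf : List String) (c : Int),
    i + ws.length = len →
    d.items = pvLabel paras →
    (pvAloop len rules min_length i ws (d, (paras.length : Int), c, buf)).items
      = pvLabel (pvGroup min_length (ws.zip (ws.map (pvFlag rules))) paras buf c) := by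
  intro ws
  induction ws with
  | nil => intro h; exact absurd rfl h
  | cons w rest ih =>
    intro _ len i d paras buf c hlen hd
    have hcontains := pvContains_false d paras hd
    have hkey : ("p" ++ PySem.Int.toStr ((paras.length : Int) + 1)) = pvKey ((paras.length : Int) + 1) := rfl
    simp only [pvAloop, pvGroup, List.zip_cons_cons, List.map_cons, pvFlag]
    by_cases hsplit : c + 1 > min_length ∧ (rules.any fun kw => PySem.Str.isIn kw w) = true
    · -- split branch: emit paragraph, reset buffer and counter
      rw [if_pos hsplit, if_pos hsplit, if_neg (by simp)]
      cases rest with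
      | nil =>
        simp only [pvAloop]
        rw [hkey, PySem.Dict.items_insert_of_not_contains d _ hcontains, hd, ← pvLabel_append]
        simp [pvGroup]
      | cons w2 rest2 =>
        rw [hkey]
        have hd2 : (PySem.Dict.insert d (pvKey ((paras.length : Int) + 1))
            (PySem.Str.join " " (buf ++ [w]))).items
            = pvLabel (paras ++ [PySem.Str.join " " (buf ++ [w])]) := by
          rw [PySem.Dict.items_insert_of_not_contains d _ hcontains, hd, pvLabel_append]
        have hrec := ih (by simp) len (i + 1)
          (PySem.Dict.insert d (pvKey ((paras.length : Int) + 1)) (PySem.Str.join " " (buf ++ [w])))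
          (paras ++ [PySem.Str.join " " (buf ++ [w])]) [] 0 (by simp at hlen ⊢; omega) hd2
        simp only [List.length_append, List.length_cons, List.length_nil, Nat.cast_add,
          Nat.cast_one, zero_add] at hrec
        exact hrec
    · -- no split: carry the buffer and counter
      rw [if_neg hsplit, if_neg hsplit]
      cases rest with
      | nil =>
        have hlast : i + 1 = len := by simp at hlen; omega
        rw [if_pos ⟨hlast, by simp⟩]
        simp only [pvAloop]
        rw [hkey, PySem.Dict.items_insert_of_not_contains d _ hcontains, hd, ← pvLabel_append]
        simp [pvGroup]
      | cons w2 rest2 =>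
        have hne : ¬ (i + 1 = len ∧ ¬(buf ++ [w]) = []) := by
          rintro ⟨h1, -⟩
          simp at hlen
          omega
        rw [if_neg hne]
        exact ih (by simp) len (i + 1) d paras (buf ++ [w]) (c + 1) (by simp at hlen ⊢; omega) hd

-- continuation of B's recursion when the current paragraph already holds the words 'buf'
def pvCont (rules : List String) (min_length : Int) (buf ws : List String) : List String :=
  match pvFindCut rules min_length (buf.length : Int) ws with
  | some r => PySem.Str.join " " (buf ++ ws.take (r + 1)) :: pvSplitRec rules min_length (ws.drop (r + 1))
  | none => if buf ++ ws = [] then [] else [PySem.Str.join " " (buf ++ ws)]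

lemma pvSplitRec_nil (rules : List String) (min_length : Int) :
    pvSplitRec rules min_length [] = [] := by
  unfold pvSplitRec; rfl

lemma pvSplitRec_take_drop (rules : List String) (min_length : Int) (w : String) (ws : List String) :
    pvSplitRec rules min_length (w :: ws)
      = match pvFindCut rules min_length 0 (w :: ws) with
        | none => [PySem.Str.join " " (w :: ws)]
        | some r => PySem.Str.join " " ((w :: ws).take (r + 1)) ::
            pvSplitRec rules min_length ((w :: ws).drop (r + 1)) := by
  rw [pvSplitRec.eq_def]
  cases h : pvFindCut rules min_length 0 (w :: ws) with
  | none => simp only [h]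
  | some r =>
    simp only [h]
    rw [PySem.List.slice_to_natCast, PySem.List.slice_from_natCast]

lemma pvCont_nil (rules : List String) (min_length : Int) (ws : List String) :
    pvCont rules min_length [] ws = pvSplitRec rules min_length ws := by
  cases ws with
  | nil => rw [pvSplitRec_nil]; simp [pvCont, pvFindCut]
  | cons w rest =>
    rw [pvSplitRec_take_drop]
    unfold pvCont
    simp only [List.length_nil, Nat.cast_zero, List.nil_append]
    cases h : pvFindCut rules min_length 0 (w :: rest) with
    | none => simp
    | some r => simp

lemma pvGroup_eq_cont (rules : List String) (min_length : Int) :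
    ∀ (ws paras buf : List String),
    pvGroup min_length (ws.zip (ws.map (pvFlag rules))) paras buf (buf.length : Int)
      = paras ++ pvCont rules min_length buf ws := by
  intro ws
  induction ws with
  | nil =>
    intro paras buf
    cases buf <;> simp [pvGroup, pvCont, pvFindCut]
  | cons w rest ih =>
    intro paras buf
    simp only [List.zip_cons_cons, List.map_cons, pvGroup, pvFlag]
    by_cases hc : ((buf.length : Int)) ≥ min_length ∧ (rules.any fun kw => PySem.Str.isIn kw w) = true
    · -- cut here
      rw [if_pos (by exact ⟨by omega, hc.2⟩)]
      have h0 := ih (paras ++ [PySem.Str.join " " (buf ++ [w])]) []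
      simp only [List.length_nil, Nat.cast_zero] at h0
      rw [h0, pvCont_nil]
      unfold pvCont
      rw [pvFindCut, if_pos hc]
      simp
    · -- no cut at this word
      have hcond : ¬ ((buf.length : Int) + 1 > min_length ∧ (rules.any fun kw => PySem.Str.isIn kw w) = true) := by
        intro h
        exact hc ⟨by omega, h.2⟩
      rw [if_neg hcond]
      have h1 := ih paras (buf ++ [w])
      simp only [List.length_append, List.length_cons, List.length_nil, Nat.cast_add,
        Nat.cast_one, zero_add] at h1
      rw [h1]
      unfold pvCont
      rw [pvFindCut, if_neg hc]
      cases h2 : pvFindCut rules min_length ((buf.length : Int) + 1) rest with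
      | none => simp [h2]
      | some r =>
        have harr : ((buf ++ [w]).length : Int) = (buf.length : Int) + 1 := by simp
        simp only [harr, h2, Option.map_some]
        simp [List.append_assoc, List.take_succ_cons, List.drop_succ_cons]

-- ===== VERDICT (by name: the statement is the Claim_ definition above) =====
theorem paragraphs_splitter_py_spec : Claim_equal_paragraphs_splitter_py := by
  intro text rules_kw min_length _
  unfold Spec_paragraphs_splitter_py paragraphs_splitter_py paragraphs_splitter_py_alt
  cases hw : PySem.Str.split₀ text with
  | nil => simp [pvAloop, PySem.Dict.empty, pvSplitRec_nil]
  | cons w rest =>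
    have h0 : (PySem.Dict.empty : PySem.Dict String String).items = pvLabel [] := by
      simp [PySem.Dict.empty, pvLabel, PySem.List.enumerate]
    have hA := pvLoop_eq (rules_kw.getD ["\n", ",", ".", ";"]) min_length (w :: rest)
      (by simp) (w :: rest).length 0 PySem.Dict.empty [] [] 0 (by simp) h0
    simp only [List.length_nil, Nat.cast_zero] at hA
    rw [hA]
    have hG := pvGroup_eq_cont (rules_kw.getD ["\n", ",", ".", ";"]) min_length (w :: rest) [] []
    simp only [List.length_nil, Nat.cast_zero, List.nil_append] at hG
    rw [hG, pvCont_nil]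
    simp [pvLabel, pvKey]
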